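-- pv_equiv track=rewrite | github.com/LabNConsulting/munet | munet/config.py | merge_using_key
-- ===== SOURCE A (Python) =====
-- def merge_using_key(a, b, k):
--     # First get a dict of indexes in `a` for the key value of `k` in objects of `a`
--     m = list(a)
--     mi = {o[k]: i for i, o in enumerate(m)}
--     for o in b:
--         bkv = o[k]
--         if bkv in mi:
--             m[mi[bkv]] = o
--         else:
--             mi[bkv] = len(m)
--             m.append(o)
--     return m
-- ===== SOURCE B (Python) =====
-- def merge_using_key(a, b, k):
--     # Phased merge: collect last b-object per key and first-seen new keys,
--     # then overwrite a's slots, then append the new objects.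
--     m = list(a)
--     pos = {o[k]: i for i, o in enumerate(m)}
--     latest = {}
--     new_order = []
--     for o in b:
--         kv = o[k]
--         if kv not in latest and kv not in pos:
--             new_order.append(kv)
--         latest[kv] = o
--     for kv, i in pos.items():
--         if kv in latest:
--             m[i] = latest[kv]
--     return m + [latest[kv] for kv in new_order]
-- ===== Notes on version B (the rewrite author's own statement) =====
-- stated objective: alternative
-- what changed: A's single fused loop over b (which mutates the merged list and the index dict together) is replaced by three phased passes: one pass over b collecting the last object per key and the first-seen new keys, then an overwrite pass over a's index, then appending the new objects.
import Mathlib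
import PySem

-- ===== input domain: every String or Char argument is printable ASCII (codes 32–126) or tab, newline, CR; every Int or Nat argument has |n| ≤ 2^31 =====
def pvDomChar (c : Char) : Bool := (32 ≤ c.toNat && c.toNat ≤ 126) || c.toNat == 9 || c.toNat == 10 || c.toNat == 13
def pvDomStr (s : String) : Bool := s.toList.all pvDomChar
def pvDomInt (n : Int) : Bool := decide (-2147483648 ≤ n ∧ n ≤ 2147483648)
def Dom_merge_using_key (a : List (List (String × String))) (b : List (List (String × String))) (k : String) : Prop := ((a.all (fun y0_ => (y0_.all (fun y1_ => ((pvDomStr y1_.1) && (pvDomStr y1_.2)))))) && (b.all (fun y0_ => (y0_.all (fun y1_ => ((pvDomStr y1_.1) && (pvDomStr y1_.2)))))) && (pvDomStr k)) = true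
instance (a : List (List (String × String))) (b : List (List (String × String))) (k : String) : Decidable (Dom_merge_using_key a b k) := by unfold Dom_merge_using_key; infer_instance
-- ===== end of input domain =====

-- B replaces A's single fused loop (index dict updated while overwriting and appending) by three
-- phased passes: collect the last b-object per key and the first-seen new keys, then overwrite
-- a's slots, then append the new objects.  Objective: alternative decomposition, same cost.

-- o[k] for a dict object o (Pre_ guarantees the key is present, so "" is never used there)
def pvKey (o : List (String × String)) (k : String) : String :=
  ((PySem.Dict.mk o).get? k).getD ""

-- {o[k]: i for i, o in enumerate(m)}  (both Pythons build this same dict comprehension)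
def pvBuildIdx (m : List (List (String × String))) (k : String) : PySem.Dict String Int :=
  (PySem.List.enumerate m).foldl (fun d p => d.insert (pvKey p.2 k) p.1) PySem.Dict.empty

-- ===== PORT A =====
def merge_using_key (a : List (List (String × String))) (b : List (List (String × String))) (k : String) : List (List (String × String)) :=
  let m := a
  let mi := pvBuildIdx m k
  let st := b.foldl (fun (st : List (List (String × String)) × PySem.Dict String Int) o =>
      let bkv := pvKey o k
      match st.2.get? bkv with
      | some i => (PySem.List.pySetD st.1 i o, st.2)                 -- m[mi[bkv]] = o
      | none   => (st.1 ++ [o], st.2.insert bkv (st.1.length : Int)) -- mi[bkv] = len(m); m.append(o)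
    ) (m, mi)
  st.1

-- ===== PORT B =====
def merge_using_key_alt (a : List (List (String × String))) (b : List (List (String × String))) (k : String) : List (List (String × String)) :=
  let m := a
  let pos := pvBuildIdx m k
  -- pass 1: latest b-object per key, and first-seen keys that are new w.r.t. a
  let st := b.foldl (fun (st : PySem.Dict String (List (String × String)) × List String) o =>
      let kv := pvKey o k
      let no := if st.1.contains kv = false ∧ pos.contains kv = false then st.2 ++ [kv] else st.2
      (st.1.insert kv o, no)
    ) (PySem.Dict.empty, [])
  let latest := st.1
  let new_order := st.2
  -- pass 2: overwrite a's slots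
  let m2 := pos.items.foldl (fun m p =>
      match latest.get? p.1 with
      | some o => PySem.List.pySetD m p.2 o
      | none   => m) m
  -- pass 3: append the new objects
  m2 ++ new_order.map (fun kv => (latest.get? kv).getD [])

-- ===== PRECONDITION & SPEC =====
-- Pre_ excludes exactly the inputs on which Python raises KeyError: some object lacks the key k.
def Pre_merge_using_key (a : List (List (String × String))) (b : List (List (String × String))) (k : String) : Prop :=
  (∀ o ∈ a, (PySem.Dict.mk o).contains k = true) ∧ (∀ o ∈ b, (PySem.Dict.mk o).contains k = true)
instance (a : List (List (String × String))) (b : List (List (String × String))) (k : String) : Decidable (Pre_merge_using_key a b k) := by unfold Pre_merge_using_key; infer_instance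

def pvWitness_merge_using_key : (List (List (String × String))) × (List (List (String × String))) × String :=
  ([[("x", "a"), ("v", "1")], [("x", "b"), ("v", "2")]],
   [[("x", "b"), ("v", "9")], [("x", "c"), ("v", "3")]],
   "x")

def Spec_merge_using_key (a : List (List (String × String))) (b : List (List (String × String))) (k : String) (out : List (List (String × String))) : Prop := out = merge_using_key_alt a b k
instance (a : List (List (String × String))) (b : List (List (String × String))) (k : String) (out : List (List (String × String))) : Decidable (Spec_merge_using_key a b k out) := by unfold Spec_merge_using_key; infer_instance

-- ===== CLAIM (what is proved, stated in full; the proofs are below) =====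
def Claim_equal_merge_using_key : Prop := ∀ (a : List (List (String × String))) (b : List (List (String × String))) (k : String), Dom_merge_using_key a b k → Pre_merge_using_key a b k → Spec_merge_using_key a b k (merge_using_key a b k)

-- ===== LEMMAS AND PROOFS =====

def pvOv (latest : PySem.Dict String (List (String × String))) (items : List (String × Int)) (m : List (List (String × String))) : List (List (String × String)) :=
  items.foldl (fun m p =>
      match latest.get? p.1 with
      | some o => PySem.List.pySetD m p.2 o
      | none   => m) m

def pvGoodIdx (d : PySem.Dict String Int) (n : Int) : Prop :=
  d.keys.Nodup ∧ (d.items.map Prod.snd).Nodup ∧ ∀ p ∈ d.items, 0 ≤ p.2 ∧ p.2 < n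

lemma pvOv_empty (items : List (String × Int)) (m : List (List (String × String))) :
    pvOv PySem.Dict.empty items m = m := by
  induction items generalizing m with
  | nil => rfl
  | cons p t ih =>
    simp only [pvOv, List.foldl_cons, PySem.Dict.get?_empty] at *
    exact ih m

lemma pvOv_length (latest : PySem.Dict String (List (String × String))) (items : List (String × Int)) (m : List (List (String × String))) :
    (pvOv latest items m).length = m.length := by
  induction items generalizing m with
  | nil => rfl
  | cons p t ih =>
    simp only [pvOv, List.foldl_cons] at *
    cases h : latest.get? p.1 <;> simp [ih, PySem.List.length_pySetD]

lemma pvOv_congr_insert (latest : PySem.Dict String (List (String × String))) (items : List (String × Int)) (m : List (List (String × String))) (kv : String) (o : List (String × String)) (h : kv ∉ items.map Prod.fst) :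
    pvOv (latest.insert kv o) items m = pvOv latest items m := by
  apply PySem.List.foldl_congr_mem
  intro acc p hp
  have hne : p.1 ≠ kv := by
    intro he; exact h (by simpa [← he] using List.mem_map_of_mem (f := Prod.fst) hp)
  rw [PySem.Dict.get?_insert_of_ne latest o hne]

lemma pvOv_pySetD (latest : PySem.Dict String (List (String × String))) (items : List (String × Int)) (m : List (List (String × String))) (i : Int) (o : List (String × String))
    (hi : 0 ≤ i) (h : ∀ p ∈ items, 0 ≤ p.2 ∧ p.2 ≠ i) :
    pvOv latest items (PySem.List.pySetD m i o) = PySem.List.pySetD (pvOv latest items m) i o := by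
  induction items generalizing m with
  | nil => rfl
  | cons p t ih =>
    have hp := h p (by simp)
    have ht : ∀ q ∈ t, 0 ≤ q.2 ∧ q.2 ≠ i := fun q hq => h q (by simp [hq])
    simp only [pvOv, List.foldl_cons] at *
    cases hg : latest.get? p.1 with
    | none => exact ih _ ht
    | some x =>
      try dsimp only
      rw [show (PySem.List.pySetD (PySem.List.pySetD m i o) p.2 x) = PySem.List.pySetD (PySem.List.pySetD m p.2 x) i o from ?_]
      · exact ih _ ht
      · rw [PySem.List.pySetD_of_nonneg (h := hi), PySem.List.pySetD_of_nonneg (h := hp.1),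
            PySem.List.pySetD_of_nonneg (h := hp.1), PySem.List.pySetD_of_nonneg (h := hi)]
        exact List.set_comm _ _ (by omega)
lemma pvReplace_nodup (items : List (String × Int)) (kv : String) (n : Int)
    (hk : (items.map Prod.fst).Nodup) (hv : (items.map Prod.snd).Nodup)
    (hb : ∀ p ∈ items, p.2 < n) :
    ((items.map (fun p => if p.1 == kv then (kv, n) else p)).map Prod.snd).Nodup := by
  induction items with
  | nil => simp
  | cons q t ih =>
    simp only [List.map_cons, List.nodup_cons] at hk hv ⊢
    have hbt : ∀ p ∈ t, p.2 < n := fun p hp => hb p (by simp [hp])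
    have hmem : ∀ x, x ∈ (t.map (fun p => if p.1 == kv then (kv, n) else p)).map Prod.snd →
        x = n ∨ x ∈ t.map Prod.snd := by
      intro x hx
      obtain ⟨p, hp, hpe⟩ := List.mem_map.mp hx
      obtain ⟨q', hq', hqe⟩ := List.mem_map.mp hp
      by_cases hc : q'.1 == kv
      · left; rw [← hpe, ← hqe]; simp [hc]
      · right; rw [← hpe, ← hqe]
        have hid : (if q'.1 == kv then (kv, n) else q') = q' := by simp [hc]
        rw [hid]; exact List.mem_map_of_mem hq'
    by_cases hq : q.1 == kv
    · simp only [hq]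
      have ht : t.map (fun p => if p.1 == kv then (kv, n) else p) = t := by
        have hall : ∀ p ∈ t, (if p.1 == kv then (kv, n) else p) = p := by
          intro p hp
          have hne : p.1 ≠ kv := by
            intro he
            apply hk.1
            have : q.1 = kv := by simpa using hq
            rw [this, ← he]
            exact List.mem_map_of_mem hp
          simp [hne]
        exact (List.map_congr_left hall).trans (List.map_id t)
      rw [ht]
      refine ⟨?_, hv.2⟩
      intro hmem'
      obtain ⟨p, hp, hpe⟩ := List.mem_map.mp hmem'
      exact absurd hpe (ne_of_lt (hbt p hp))
    · have hqq : (if q.1 == kv then (kv, n) else q) = q := by simp [hq]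
      rw [hqq]
      refine ⟨?_, ih hk.2 hv.2 hbt⟩
      intro hx
      rcases hmem q.2 hx with h1 | h2
      · exact absurd h1 (ne_of_lt (hb q (by simp)))
      · exact hv.1 h2

lemma pvGoodIdx_insert (d : PySem.Dict String Int) (n : Int) (kv : String) (hn : 0 ≤ n) (h : pvGoodIdx d n) :
    pvGoodIdx (d.insert kv n) (n + 1) := by
  obtain ⟨hk, hv, hb⟩ := h
  have hkl : (d.items.map Prod.fst).Nodup := by simpa [PySem.Dict.keys] using hk
  refine ⟨PySem.Dict.nodup_keys_insert d kv n hk, ?_, ?_⟩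
  · rw [PySem.Dict.items_insert]
    split_ifs with hc
    · exact pvReplace_nodup d.items kv n hkl hv (fun p hp => (hb p hp).2)
    · simp only [List.map_append, List.map_cons, List.map_nil]
      rw [List.nodup_append]
      refine ⟨hv, by simp, ?_⟩
      intro x hx y hy
      have hyn : y = n := by simpa using hy
      subst hyn
      obtain ⟨p, hp, hpe⟩ := List.mem_map.mp hx
      rw [← hpe]
      exact ne_of_lt (hb p hp).2
  · rw [PySem.Dict.items_insert]
    split_ifs with hc
    · intro p hp
      obtain ⟨q, hq, hqe⟩ := List.mem_map.mp hp
      have hbq := hb q hq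
      by_cases hqc : q.1 == kv
      · rw [← hqe]; simp only [hqc, if_pos]
        exact ⟨hn, by omega⟩
      · rw [← hqe]; simp only [hqc, if_neg, Bool.false_eq_true, not_false_eq_true]
        exact ⟨hbq.1, by omega⟩
    · intro p hp
      rcases List.mem_append.mp hp with h1 | h2
      · have := hb p h1; exact ⟨this.1, by omega⟩
      · simp at h2; subst h2
        exact ⟨hn, by omega⟩

lemma pvBuildIdx_aux (k : String) : ∀ (l : List (List (String × String))) (i0 : Int) (d : PySem.Dict String Int), 0 ≤ i0 → pvGoodIdx d i0 →
    pvGoodIdx ((PySem.List.enumerate l i0).foldl (fun d p => d.insert (pvKey p.2 k) p.1) d) (i0 + l.length) := by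
  intro l
  induction l with
  | nil => intro i0 d h0 hg; simpa using hg
  | cons x t ih =>
    intro i0 d h0 hg
    have he : PySem.List.enumerate (x::t) i0 = (i0, x) :: PySem.List.enumerate t (i0+1) := rfl
    rw [he, List.foldl_cons]
    have h2 := ih (i0+1) (d.insert (pvKey x k) i0) (by omega) (pvGoodIdx_insert d i0 (pvKey x k) h0 hg)
    have harith : (i0 + 1) + (t.length : Int) = i0 + ((x::t).length : Int) := by push_cast [List.length_cons]; ring
    rw [← harith]
    exact h2

lemma pvBuildIdx_good (a : List (List (String × String))) (k : String) :
    pvGoodIdx (pvBuildIdx a k) (a.length : Int) := by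
  have h := pvBuildIdx_aux k a 0 PySem.Dict.empty (le_refl 0) ?_
  · simpa [pvBuildIdx] using h
  · refine ⟨by simp [PySem.Dict.empty, PySem.Dict.keys], by simp [PySem.Dict.empty], by simp [PySem.Dict.empty]⟩

lemma pvSet_append_right {α : Type} (x y : List α) (j : Nat) (o : α) :
    (x ++ y).set (x.length + j) o = x ++ y.set j o := by
  rw [List.set_append]
  simp

lemma pvMap_insert_not_mem (latest : PySem.Dict String (List (String × String))) (order : List String) (kv : String) (o : List (String × String)) (h : kv ∉ order) :
    order.map (fun x => ((latest.insert kv o).get? x).getD []) = order.map (fun x => ((latest.get? x).getD [])) := by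
  apply List.map_congr_left
  intro x hx
  have hne : x ≠ kv := by intro he; rw [he] at hx; exact h hx
  rw [PySem.Dict.get?_insert_of_ne latest o hne]

lemma pvMap_insert_mem (latest : PySem.Dict String (List (String × String))) (order : List String) (kv : String) (o : List (String × String)) (j : Nat)
    (hnd : order.Nodup) (hj : j < order.length) (hkv : order[j] = kv) :
    order.map (fun x => ((latest.insert kv o).get? x).getD []) = (order.map (fun x => ((latest.get? x).getD []))).set j o := by
  induction order generalizing j with
  | nil => simp at hj
  | cons q t ih =>
    cases j with
    | zero =>
      simp only [List.getElem_cons_zero] at hkv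
      subst hkv
      simp only [List.map_cons, List.set_cons_zero]
      rw [PySem.Dict.get?_insert_self]
      simp only [Option.getD_some]
      congr 1
      exact pvMap_insert_not_mem latest t q o (by simpa using (List.nodup_cons.mp hnd).1)
    | succ j' =>
      simp only [List.getElem_cons_succ] at hkv
      simp only [List.map_cons, List.set_cons_succ]
      congr 1
      · rw [PySem.Dict.get?_insert_of_ne latest o ?_]
        intro he
        apply (List.nodup_cons.mp hnd).1
        rw [he, ← hkv]
        exact List.getElem_mem _
      · apply ih <;> first
          | exact (List.nodup_cons.mp hnd).2
          | simpa using hj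
          | exact hkv

lemma pvOv_insert (latest : PySem.Dict String (List (String × String))) (items : List (String × Int)) (m : List (List (String × String))) (kv : String) (i : Int) (o : List (String × String))
    (hk : (items.map Prod.fst).Nodup) (hv : (items.map Prod.snd).Nodup)
    (hpos : ∀ p ∈ items, 0 ≤ p.2) (hmem : (kv, i) ∈ items) :
    pvOv (latest.insert kv o) items m = PySem.List.pySetD (pvOv latest items m) i o := by
  induction items generalizing m with
  | nil => simp at hmem
  | cons p t ih =>
    simp only [List.map_cons, List.nodup_cons] at hk hv
    have hpt : ∀ q ∈ t, 0 ≤ q.2 := fun q hq => hpos q (by simp [hq])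
    by_cases hp : p.1 = kv
    · have hpe : p = (kv, i) := by
        rcases List.mem_cons.mp hmem with h1 | h2
        · exact h1.symm
        · exact absurd (hp ▸ List.mem_map_of_mem (f := Prod.fst) h2) hk.1
      subst hpe
      simp only [pvOv, List.foldl_cons]
      rw [PySem.Dict.get?_insert_self]
      try dsimp only
      have hcongr : t.foldl (fun m p =>
          match (latest.insert kv o).get? p.1 with
          | some o => PySem.List.pySetD m p.2 o
          | none   => m) (PySem.List.pySetD m i o)
          = pvOv latest t (PySem.List.pySetD m i o) :=
        pvOv_congr_insert latest t _ kv o hk.1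
      rw [hcongr]
      have hset := pvOv_pySetD latest t m i o (hpos (kv, i) (by simp)) ?_
      · rw [hset]
        cases hg : latest.get? kv with
        | none => rfl
        | some x =>
          try dsimp only
          have hch : List.foldl (fun m p =>
              match latest.get? p.1 with
              | some o => PySem.List.pySetD m p.2 o
              | none   => m) (PySem.List.pySetD m i x) t = pvOv latest t (PySem.List.pySetD m i x) := rfl
          rw [hch, pvOv_pySetD latest t m i x (hpos (kv, i) (by simp)) ?_]
          · rw [PySem.List.pySetD_of_nonneg (h := hpos (kv, i) (by simp)), PySem.List.pySetD_of_nonneg (h := hpos (kv, i) (by simp)), PySem.List.pySetD_of_nonneg (h := hpos (kv, i) (by simp)), List.set_set]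
          · intro q hq
            refine ⟨hpt q hq, fun he => hv.1 ?_⟩
            have hmm : q.2 ∈ t.map Prod.snd := List.mem_map_of_mem hq
            exact he ▸ hmm
      · intro q hq
        refine ⟨hpt q hq, fun he => hv.1 ?_⟩
        have hmm : q.2 ∈ t.map Prod.snd := List.mem_map_of_mem hq
        exact he ▸ hmm
    · have hmem' : (kv, i) ∈ t := by
        rcases List.mem_cons.mp hmem with h1 | h2
        · exact absurd (by rw [← h1]) hp
        · exact h2
      simp only [pvOv, List.foldl_cons]
      rw [PySem.Dict.get?_insert_of_ne latest o hp]
      cases hg : latest.get? p.1 with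
      | none => exact ih _ hk.2 hv.2 hpt hmem'
      | some x => exact ih _ hk.2 hv.2 hpt hmem'

def pvS (a : List (List (String × String))) (k : String) (latest : PySem.Dict String (List (String × String))) (order : List String) : List (List (String × String)) :=
  pvOv latest (pvBuildIdx a k).items a ++ order.map (fun kv => (latest.get? kv).getD [])

def pvInv (a : List (List (String × String))) (k : String) (latest : PySem.Dict String (List (String × String))) (order : List String) : Prop :=
  order.Nodup ∧ (∀ kv ∈ order, (pvBuildIdx a k).contains kv = false) ∧
  (∀ kv, (pvBuildIdx a k).contains kv = false → (latest.contains kv = true ↔ kv ∈ order))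

lemma pvMain (a : List (List (String × String))) (k : String) (b : List (List (String × String))) :
    ∀ (latest : PySem.Dict String (List (String × String))) (order : List String) (mi : PySem.Dict String Int),
    pvInv a k latest order →
    (∀ kv, (pvBuildIdx a k).contains kv = true → mi.get? kv = (pvBuildIdx a k).get? kv) →
    (∀ kv, (pvBuildIdx a k).contains kv = false → kv ∉ order → mi.get? kv = none) →
    (∀ j (hj : j < order.length), mi.get? order[j] = some ((a.length : Int) + j)) →
    (b.foldl (fun (st : List (List (String × String)) × PySem.Dict String Int) o =>
      let bkv := pvKey o k
      match st.2.get? bkv with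
      | some i => (PySem.List.pySetD st.1 i o, st.2)
      | none   => (st.1 ++ [o], st.2.insert bkv (st.1.length : Int))) (pvS a k latest order, mi)).1
    = (fun (st : PySem.Dict String (List (String × String)) × List String) => pvS a k st.1 st.2)
      (b.foldl (fun (st : PySem.Dict String (List (String × String)) × List String) o =>
        let kv := pvKey o k
        let no := if st.1.contains kv = false ∧ (pvBuildIdx a k).contains kv = false then st.2 ++ [kv] else st.2
        (st.1.insert kv o, no)) (latest, order)) := by
  induction b with
  | nil => intro latest order mi _ _ _ _; rfl
  | cons o t ih =>
    intro latest order mi hInv h1 h2 h3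
    obtain ⟨hnd, hord, hiff⟩ := hInv
    obtain ⟨hposk, hposv, hposb⟩ := pvBuildIdx_good a k
    have hkeys : (pvBuildIdx a k).keys = (pvBuildIdx a k).items.map Prod.fst := rfl
    set kv := pvKey o k with hkv
    simp only [List.foldl_cons]
    by_cases hc : (pvBuildIdx a k).contains kv = true
    · -- overwrite inside a
      have hgi := h1 kv hc
      have hsome : ((pvBuildIdx a k).get? kv).isSome := by
        rw [← PySem.Dict.contains_eq_isSome_get?]; exact hc
      obtain ⟨i, hi⟩ := Option.isSome_iff_exists.mp hsome
      have hmem : (kv, i) ∈ (pvBuildIdx a k).items := PySem.Dict.mem_items_of_get?_eq_some _ hi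
      have hib := hposb (kv, i) hmem
      have hnotord : kv ∉ order := by
        intro hin
        rw [hord kv hin] at hc; exact Bool.false_ne_true hc
      have hstep : pvS a k (latest.insert kv o) order = PySem.List.pySetD (pvS a k latest order) i o := by
        unfold pvS
        rw [pvOv_insert latest _ a kv i o (by rw [← hkeys]; exact hposk) hposv (fun p hp => (hposb p hp).1) hmem]
        rw [pvMap_insert_not_mem latest order kv o hnotord]
        rw [PySem.List.pySetD_of_nonneg (h := hib.1), PySem.List.pySetD_of_nonneg (h := hib.1)]
        rw [List.set_append]
        have hlen : (pvOv latest (pvBuildIdx a k).items a).length = a.length := pvOv_length _ _ _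
        rw [if_pos (by rw [hlen]; omega)]
      have hbcond : ¬ (latest.contains kv = false ∧ (pvBuildIdx a k).contains kv = false) := by
        intro hh; rw [hc] at hh; simp at hh
      try dsimp only
      rw [hgi, hi]
      try dsimp only
      rw [if_neg hbcond, ← hstep]
      apply ih (latest.insert kv o) order mi ?_ h1 h2 h3
      refine ⟨hnd, hord, ?_⟩
      intro kv' hkc
      have hne : kv' ≠ kv := by intro he; rw [he, hc] at hkc; simp at hkc
      rw [PySem.Dict.contains_insert]
      simp only [show (kv' == kv) = false by simpa using hne, Bool.false_or]
      exact hiff kv' hkc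
    · have hc' : (pvBuildIdx a k).contains kv = false := by
        cases h : (pvBuildIdx a k).contains kv
        · rfl
        · exact absurd h hc
      have hknot : kv ∉ (pvBuildIdx a k).items.map Prod.fst := by
        rw [← hkeys]
        intro hin
        rw [(PySem.Dict.contains_iff_mem_keys _ kv).mpr hin] at hc'
        simp at hc'
      by_cases hm : kv ∈ order
      · -- overwrite inside the appended part
        obtain ⟨j, hj, hje⟩ := List.mem_iff_getElem.mp hm
        have hgj := h3 j hj
        rw [hje] at hgj
        have hstep : pvS a k (latest.insert kv o) order = PySem.List.pySetD (pvS a k latest order) ((a.length : Int) + j) o := by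
          unfold pvS
          rw [pvOv_congr_insert latest _ a kv o hknot]
          rw [pvMap_insert_mem latest order kv o j hnd hj hje]
          rw [PySem.List.pySetD_of_nonneg (h := by positivity)]
          have hlen : (pvOv latest (pvBuildIdx a k).items a).length = a.length := pvOv_length _ _ _
          have htn : ((a.length : Int) + (j : Int)).toNat = (pvOv latest (pvBuildIdx a k).items a).length + j := by
            rw [hlen]; omega
          rw [htn, pvSet_append_right]
        have hbcond : ¬ (latest.contains kv = false ∧ (pvBuildIdx a k).contains kv = false) := by
          intro hh
          have h' := (hiff kv hc').mpr hm
          rw [hh.1] at h'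
          exact Bool.false_ne_true h'
        try dsimp only
        rw [hgj]
        dsimp only
        rw [if_neg hbcond, ← hstep]
        apply ih (latest.insert kv o) order mi ?_ h1 h2 h3
        refine ⟨hnd, hord, ?_⟩
        intro kv' hkc
        rw [PySem.Dict.contains_insert]
        by_cases he : kv' = kv
        · subst he; simp [hm]
        · simp only [show (kv' == kv) = false by simpa using he, Bool.false_or]
          exact hiff kv' hkc
      · -- append a new object
        have hnone := h2 kv hc' hm
        have hlcont : latest.contains kv = false := by
          cases h : latest.contains kv
          · rfl
          · exact absurd (((hiff kv hc').mp h)) hm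
        have hlen : (pvS a k latest order).length = a.length + order.length := by
          unfold pvS
          rw [List.length_append, pvOv_length, List.length_map]
        have hstep : pvS a k (latest.insert kv o) (order ++ [kv]) = pvS a k latest order ++ [o] := by
          unfold pvS
          rw [pvOv_congr_insert latest _ a kv o hknot]
          rw [List.map_append, pvMap_insert_not_mem latest order kv o hm]
          rw [List.map_singleton, PySem.Dict.get?_insert_self]
          rw [← List.append_assoc]
          rfl
        try dsimp only
        rw [hnone]
        dsimp only
        rw [if_pos ⟨hlcont, hc'⟩, ← hstep]
        apply ih (latest.insert kv o) (order ++ [kv]) (mi.insert kv ((pvS a k latest order).length : Int)) ?_ ?_ ?_ ?_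
        · refine ⟨?_, ?_, ?_⟩
          · rw [List.nodup_append]
            refine ⟨hnd, List.nodup_singleton kv, ?_⟩
            intro x hx y hy
            have hyk : y = kv := by simpa using hy
            subst hyk
            intro he; exact hm (he ▸ hx)
          · intro kv' hin
            rcases List.mem_append.mp hin with h' | h'
            · exact hord kv' h'
            · simp at h'; subst h'; exact hc'
          · intro kv' hkc
            rw [PySem.Dict.contains_insert]
            by_cases he : kv' = kv
            · subst he; simp
            · simp only [show (kv' == kv) = false by simpa using he, Bool.false_or]
              rw [hiff kv' hkc]
              simp [he]
        · intro kv' hkc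
          have hne : kv' ≠ kv := by intro he; rw [he, hc'] at hkc; exact Bool.false_ne_true hkc
          rw [PySem.Dict.get?_insert_of_ne _ _ hne]
          exact h1 kv' hkc
        · intro kv' hkc hnin
          have hne : kv' ≠ kv := by intro he; exact hnin (by rw [he]; simp)
          rw [PySem.Dict.get?_insert_of_ne _ _ hne]
          exact h2 kv' hkc (fun hin => hnin (List.mem_append.mpr (Or.inl hin)))
        · intro j hj
          rw [List.length_append, List.length_singleton] at hj
          by_cases hje : j < order.length
          · have hgetj : (order ++ [kv])[j] = order[j] := List.getElem_append_left hje
            rw [hgetj]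
            have hne : order[j] ≠ kv := fun he => hm (he ▸ List.getElem_mem hje)
            rw [PySem.Dict.get?_insert_of_ne _ _ hne]
            exact h3 j hje
          · have hjeq : j = order.length := by omega
            subst hjeq
            have hgetj : (order ++ [kv])[order.length] = kv := by
              rw [List.getElem_append_right (by omega)]
              simp
            rw [hgetj, PySem.Dict.get?_insert_self, hlen]
            exact congrArg some (by push_cast; ring)


-- ===== VERDICT (by name: the statement is the Claim_ definition above) =====
theorem merge_using_key_spec : Claim_equal_merge_using_key := by
  intro a b k _ _
  unfold Spec_merge_using_key merge_using_key merge_using_key_alt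
  dsimp only
  have hS : pvS a k PySem.Dict.empty [] = a := by
    unfold pvS
    rw [pvOv_empty, List.map_nil, List.append_nil]
  have h := pvMain a k b PySem.Dict.empty [] (pvBuildIdx a k) ?_ ?_ ?_ ?_
  · rw [hS] at h
    exact h
  · refine ⟨List.nodup_nil, by simp, ?_⟩
    intro kv _
    simp [PySem.Dict.contains_empty]
  · intro kv _
    rfl
  · intro kv hkc _
    exact (PySem.Dict.get?_eq_none_iff_contains _ kv).mpr hkc
  · intro j hj
    simp at hj
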